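-- pv_equiv track=rewrite | github.com/rlaehd12/problemss | bj1244.py | turn_fe
-- ===== SOURCE A (Python) =====
-- def turn_fe(lst, obj): #여자일때
--     idx = obj -1 # 인덱스값
--     count = 1    # 앞뒤 확인용
--     if lst[idx] == '0': # 일단 목표 스위치 키고 끄기
--         lst[idx] = '1'
--     else:
--         lst[idx] = '0'
--
--     while (idx-count >= 0) and (idx+count <= len(lst)-1) and (lst[idx+count] == lst[idx-count]):#주위인데 0보다는 크고 리스트보다는 작은 인덱스 값 가져야 함
--         # 어차피 앞쪽 끝나면 뒤쪽 무시함
--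
--         if lst[idx+count] == '0': #목표 주위 스위치 키고 끄기
--             lst[idx+count] = '1'
--             lst[idx-count] = '1'
--         else:
--             lst[idx+count] = '0'
--             lst[idx-count] = '0'
--         count += 1 #더 큰 앞뒤 확인
--
--     return lst
-- ===== SOURCE B (Python) =====
-- def turn_fe(lst, obj):
--     idx = obj - 1
--     lst[idx] = '1' if lst[idx] == '0' else '0'
--     n = len(lst)
--     count = 1
--     while idx - count >= 0 and idx + count <= n - 1 and lst[idx + count] == lst[idx - count]:
--         count += 1
--     r = count - 1
--     for c in range(1, r + 1):
--         lst[idx + c] = '1' if lst[idx + c] == '0' else '0'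
--         lst[idx - c] = '1' if lst[idx - c] == '0' else '0'
--     return lst
-- ===== Notes on version B (the rewrite author's own statement) =====
-- stated objective: alternative
-- what changed: A fuses testing and flipping in one while loop that mutates as it scans; B first computes the palindromic radius in a read-only scan and then applies the toggles in a separate pass over range(1, r+1).
import Mathlib
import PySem

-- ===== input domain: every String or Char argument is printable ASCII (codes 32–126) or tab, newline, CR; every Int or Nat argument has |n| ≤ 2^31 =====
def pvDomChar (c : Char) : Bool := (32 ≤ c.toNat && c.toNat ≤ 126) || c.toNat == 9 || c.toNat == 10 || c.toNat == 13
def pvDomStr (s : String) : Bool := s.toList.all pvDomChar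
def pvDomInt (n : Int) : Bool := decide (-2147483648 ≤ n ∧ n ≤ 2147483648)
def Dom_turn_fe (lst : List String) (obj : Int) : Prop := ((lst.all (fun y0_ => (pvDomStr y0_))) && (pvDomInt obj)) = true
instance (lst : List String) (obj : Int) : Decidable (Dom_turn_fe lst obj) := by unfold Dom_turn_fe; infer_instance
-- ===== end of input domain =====

-- B separates the work into a read-only radius scan followed by an apply pass (alternative
-- decomposition, same cost). Both Pythons mutate lst in place identically; the equivalence
-- proved here is about the return value.

-- ===== PORT A =====
-- A's while loop: test the symmetric pair at distance `count` and toggle it in the same step.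
def turnFeLoopA (idx : Int) (lst : List String) (count : Int) : List String :=
  if h : idx - count ≥ 0 ∧ idx + count ≤ (lst.length : Int) - 1 ∧
      PySem.List.pyGetD lst (idx + count) "" = PySem.List.pyGetD lst (idx - count) "" then
    let v := if PySem.List.pyGetD lst (idx + count) "" = "0" then "1" else "0"
    turnFeLoopA idx
      (PySem.List.pySetD (PySem.List.pySetD lst (idx + count) v) (idx - count) v) (count + 1)
  else lst
termination_by ((lst.length : Int) - (idx + count)).toNat
decreasing_by simp only [PySem.List.length_pySetD]; omega

def turn_fe (lst : List String) (obj : Int) : List String :=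
  let idx := obj - 1
  let lst1 := PySem.List.pySetD lst idx
    (if PySem.List.pyGetD lst idx "" = "0" then "1" else "0")
  turnFeLoopA idx lst1 1

-- ===== PORT B =====
-- B's read-only scan for the final `count` (the loop in Source B that only increments count).
def turnFeScanB (idx : Int) (lst : List String) (count : Int) : Int :=
  if h : idx - count ≥ 0 ∧ idx + count ≤ (lst.length : Int) - 1 ∧
      PySem.List.pyGetD lst (idx + count) "" = PySem.List.pyGetD lst (idx - count) "" then
    turnFeScanB idx lst (count + 1)
  else count
termination_by ((lst.length : Int) - (idx + count)).toNat
decreasing_by omega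

-- one statement `lst[i] = '1' if lst[i] == '0' else '0'` of Source B
def turnFeFlip (lst : List String) (i : Int) : List String :=
  PySem.List.pySetD lst i (if PySem.List.pyGetD lst i "" = "0" then "1" else "0")

def turn_fe_alt (lst : List String) (obj : Int) : List String :=
  let idx := obj - 1
  let lst1 := turnFeFlip lst idx
  let r := turnFeScanB idx lst1 1 - 1
  (PySem.List.pyRange 1 (r + 1) 1).foldl (fun l c => turnFeFlip (turnFeFlip l (idx + c)) (idx - c)) lst1

-- ===== PRECONDITION & SPEC =====
-- A raises IndexError exactly when the first access lst[obj-1] is out of range; all later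
-- accesses are guarded in range. Pre_ excludes exactly those raising inputs.
def Pre_turn_fe (lst : List String) (obj : Int) : Prop := PySem.Raise.InRange lst.length (obj - 1)
instance (lst : List String) (obj : Int) : Decidable (Pre_turn_fe lst obj) := by unfold Pre_turn_fe; infer_instance
def pvWitness_turn_fe : List String × Int := (["1", "0", "1", "0", "1"], 3)

def Spec_turn_fe (lst : List String) (obj : Int) (out : List String) : Prop := out = turn_fe_alt lst obj
instance (lst : List String) (obj : Int) (out : List String) : Decidable (Spec_turn_fe lst obj out) := by unfold Spec_turn_fe; infer_instance

-- ===== CLAIM (what is proved, stated in full; the proofs are below) =====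
def Claim_equal_turn_fe : Prop := ∀ (lst : List String) (obj : Int), Dom_turn_fe lst obj → Pre_turn_fe lst obj → Spec_turn_fe lst obj (turn_fe lst obj)

-- ===== LEMMAS AND PROOFS =====

lemma turnFeScanB_ge (idx : Int) (lst : List String) (count : Int) :
    count ≤ turnFeScanB idx lst count := by
  unfold turnFeScanB
  split
  · have := turnFeScanB_ge idx lst (count + 1)
    omega
  · omega
termination_by ((lst.length : Int) - (idx + count)).toNat
decreasing_by omega

-- the scan only reads positions idx ± c for c ≥ count
lemma turnFeScanB_congr (idx count : Int) (l1 l2 : List String)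
    (hlen : l1.length = l2.length)
    (h : ∀ c : Int, count ≤ c → 0 ≤ idx - c → idx + c ≤ (l1.length : Int) - 1 →
      PySem.List.pyGetD l1 (idx + c) "" = PySem.List.pyGetD l2 (idx + c) "" ∧
      PySem.List.pyGetD l1 (idx - c) "" = PySem.List.pyGetD l2 (idx - c) "") :
    turnFeScanB idx l1 count = turnFeScanB idx l2 count := by
  unfold turnFeScanB
  by_cases hb : 0 ≤ idx - count ∧ idx + count ≤ (l1.length : Int) - 1
  · have hc := h count le_rfl hb.1 hb.2
    rw [hc.1, hc.2, hlen]
    split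
    · exact turnFeScanB_congr idx (count + 1) l1 l2 hlen
        (fun c hcc h1 h2 => h c (by omega) h1 (by omega))
    · rfl
  · have hn1 : ¬(idx - count ≥ 0 ∧ idx + count ≤ ((l1.length : Int)) - 1 ∧
        PySem.List.pyGetD l1 (idx + count) "" = PySem.List.pyGetD l1 (idx - count) "") :=
      fun hx => hb ⟨hx.1, hx.2.1⟩
    have hn2 : ¬(idx - count ≥ 0 ∧ idx + count ≤ ((l2.length : Int)) - 1 ∧
        PySem.List.pyGetD l2 (idx + count) "" = PySem.List.pyGetD l2 (idx - count) "") :=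
      fun hx => hb ⟨hx.1, by have := hx.2.1; omega⟩
    rw [dif_neg hn1, dif_neg hn2]
termination_by ((l1.length : Int) - (idx + count)).toNat
decreasing_by omega

lemma pyGetD_pySetD_ne (l : List String) (i j : Int) (v : String)
    (hij : i ≠ j) (hi : 0 ≤ i) (hj : 0 ≤ j) :
    PySem.List.pyGetD (PySem.List.pySetD l i v) j "" = PySem.List.pyGetD l j "" := by
  obtain ⟨n, rfl⟩ := Int.eq_ofNat_of_zero_le hi
  obtain ⟨m, rfl⟩ := Int.eq_ofNat_of_zero_le hj
  by_cases hn : n < l.length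
  · rw [PySem.List.pyGetD_pySetD_natCast _ _ _ _ _ hn, if_neg (show ¬ m = n by omega)]
  · have hnone : PySem.List.pySet? l (n : Int) v = none := by
      rw [PySem.List.pySet?_eq_none_iff]
      simp [PySem.Raise.InRange]
      omega
    unfold PySem.List.pySetD
    rw [hnone]
    rfl

-- main invariant: A's fused loop equals B's scan-then-apply from any state
lemma loop_eq_scan (idx : Int) (lst : List String) (count : Int) (hc : 1 ≤ count) :
    turnFeLoopA idx lst count =
      (PySem.List.pyRange count (turnFeScanB idx lst count) 1).foldl
        (fun l c => turnFeFlip (turnFeFlip l (idx + c)) (idx - c)) lst := by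
  rw [turnFeLoopA, turnFeScanB]
  split
  · rename_i h
    obtain ⟨h1, h2, h3⟩ := h
    set v := if PySem.List.pyGetD lst (idx + count) "" = "0" then "1" else "0" with hv
    set lst' := PySem.List.pySetD (PySem.List.pySetD lst (idx + count) v) (idx - count) v with hl'
    have hlen : lst'.length = lst.length := by
      simp [hl', PySem.List.length_pySetD]
    -- the scan on the mutated list agrees from count+1 on
    have hscan : turnFeScanB idx lst' (count + 1) = turnFeScanB idx lst (count + 1) := by
      apply turnFeScanB_congr idx (count + 1) lst' lst hlen
      intro c hcc hcl hcr
      constructor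
      · rw [hl', pyGetD_pySetD_ne _ _ _ _ (by omega) (by omega) (by omega),
          pyGetD_pySetD_ne _ _ _ _ (by omega) (by omega) (by omega)]
      · rw [hl', pyGetD_pySetD_ne _ _ _ _ (by omega) (by omega) (by omega),
          pyGetD_pySetD_ne _ _ _ _ (by omega) (by omega) (by omega)]
    have hge : count + 1 ≤ turnFeScanB idx lst (count + 1) := turnFeScanB_ge _ _ _
    -- one fused A step = B's two flips
    have hstep : turnFeFlip (turnFeFlip lst (idx + count)) (idx - count) = lst' := by
      rw [turnFeFlip, turnFeFlip, hl', ← hv,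
        pyGetD_pySetD_ne _ _ _ _ (by omega) (by omega) (by omega), ← h3, ← hv]
    rw [loop_eq_scan idx lst' (count + 1) (by omega), hscan,
      PySem.List.pyRange_one_cons (show count < turnFeScanB idx lst (count + 1) by omega),
      List.foldl_cons, hstep]
  · rw [PySem.List.pyRange_one_eq_nil (by omega)]
    rfl
termination_by ((lst.length : Int) - (idx + count)).toNat
decreasing_by simp only [PySem.List.length_pySetD]; omega

-- ===== VERDICT (by name: the statement is the Claim_ definition above) =====
theorem turn_fe_spec : Claim_equal_turn_fe := by
  intro lst obj _ _
  unfold Spec_turn_fe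
  simp only [turn_fe, turn_fe_alt, turnFeFlip, sub_add_cancel]
  exact loop_eq_scan _ _ 1 le_rfl
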